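-- pv_equiv track=rewrite | github.com/HengyeChen/deepV | step2/post_conv3.step3.py | has_nearby_reads
-- ===== SOURCE A (Python) =====
-- def has_nearby_reads(x_value, y_value, counts_by_x, window=3):
--     for x_val in range(x_value - window, x_value + window + 1):
--         x_counts = counts_by_x.get(x_val)
--         if not x_counts:
--             continue
--         for y_val in range(y_value - window, y_value + window + 1):
--             if y_val in x_counts:
--                 return True
--     return False
-- ===== SOURCE B (Python) =====
-- def has_nearby_reads(x_value, y_value, counts_by_x, window=3):
--     # Iterate the stored entries instead of enumerating the neighborhood box:
--     # a read (x, ys) contributes iff its column is within the window and it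
--     # holds some y within the window.
--     return any(
--         abs(x - x_value) <= window
--         and any(abs(y - y_value) <= window for y in ys)
--         for x, ys in counts_by_x.items()
--     )
-- ===== Notes on version B (the rewrite author's own statement) =====
-- stated objective: alternative
-- what changed: Instead of enumerating every cell of the (2*window+1)^2 neighborhood box and probing the dict / scanning the count list for each cell, B makes one pass over the dict's stored entries and bounds-checks each entry's coordinates against the window.
import Mathlib
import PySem

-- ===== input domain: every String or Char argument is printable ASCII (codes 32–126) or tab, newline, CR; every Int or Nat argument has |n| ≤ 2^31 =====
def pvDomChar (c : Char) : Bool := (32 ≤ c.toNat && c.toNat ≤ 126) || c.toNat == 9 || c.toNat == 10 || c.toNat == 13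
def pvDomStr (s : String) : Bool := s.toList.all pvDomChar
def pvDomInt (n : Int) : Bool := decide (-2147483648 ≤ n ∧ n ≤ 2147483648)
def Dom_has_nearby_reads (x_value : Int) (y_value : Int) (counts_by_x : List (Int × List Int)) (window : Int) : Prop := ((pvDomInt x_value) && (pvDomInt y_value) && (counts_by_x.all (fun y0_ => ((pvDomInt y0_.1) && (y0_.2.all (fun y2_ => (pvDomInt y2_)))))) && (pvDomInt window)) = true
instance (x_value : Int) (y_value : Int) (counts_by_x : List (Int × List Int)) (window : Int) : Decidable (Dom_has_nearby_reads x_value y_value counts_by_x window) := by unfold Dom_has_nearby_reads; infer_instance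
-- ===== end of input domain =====

-- B replaces the scan of the (2*window+1)^2 neighborhood box by one pass over the
-- dict's stored entries, bounds-checking each entry against the window (objective: alternative).

-- ===== PORT A =====
def has_nearby_reads (x_value : Int) (y_value : Int) (counts_by_x : List (Int × List Int)) (window : Int) : Bool :=
  (PySem.List.pyRange (x_value - window) (x_value + window + 1) 1).any (fun x_val =>
    match (PySem.Dict.mk counts_by_x).get? x_val with
    | none => false          -- `if not x_counts: continue` (None case)
    | some x_counts =>
      if x_counts.isEmpty then false   -- `if not x_counts: continue` (empty-list case)
      else (PySem.List.pyRange (y_value - window) (y_value + window + 1) 1).any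
        (fun y_val => x_counts.contains y_val))

-- ===== PORT B =====
def has_nearby_reads_alt (x_value : Int) (y_value : Int) (counts_by_x : List (Int × List Int)) (window : Int) : Bool :=
  counts_by_x.any (fun p =>
    decide (|p.1 - x_value| ≤ window) &&
    p.2.any (fun y => decide (|y - y_value| ≤ window)))

-- ===== PRECONDITION & SPEC =====
-- Pre_ excludes association lists with duplicate keys: they do not arise from a Python
-- dict (whose keys are unique), and which entry A's dict lookup would see is accidental.
def Pre_has_nearby_reads (x_value : Int) (y_value : Int) (counts_by_x : List (Int × List Int)) (window : Int) : Prop :=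
  (counts_by_x.map Prod.fst).Nodup
instance (x_value : Int) (y_value : Int) (counts_by_x : List (Int × List Int)) (window : Int) : Decidable (Pre_has_nearby_reads x_value y_value counts_by_x window) := by unfold Pre_has_nearby_reads; infer_instance
def pvWitness_has_nearby_reads : Int × Int × (List (Int × List Int)) × Int := (2, 5, [(1, [4, 9]), (7, [5])], 3)
def Spec_has_nearby_reads (x_value : Int) (y_value : Int) (counts_by_x : List (Int × List Int)) (window : Int) (out : Bool) : Prop := out = has_nearby_reads_alt x_value y_value counts_by_x window
instance (x_value : Int) (y_value : Int) (counts_by_x : List (Int × List Int)) (window : Int) (out : Bool) : Decidable (Spec_has_nearby_reads x_value y_value counts_by_x window out) := by unfold Spec_has_nearby_reads; infer_instance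

-- ===== CLAIM (what is proved, stated in full; the proofs are below) =====
def Claim_equal_has_nearby_reads : Prop := ∀ (x_value : Int) (y_value : Int) (counts_by_x : List (Int × List Int)) (window : Int), Dom_has_nearby_reads x_value y_value counts_by_x window → Pre_has_nearby_reads x_value y_value counts_by_x window → Spec_has_nearby_reads x_value y_value counts_by_x window (has_nearby_reads x_value y_value counts_by_x window)

-- ===== LEMMAS AND PROOFS =====

-- Characterisation of the port of A: true iff some stored entry lies in the window box.
theorem hnr_a_iff (x_value y_value : Int) (counts_by_x : List (Int × List Int)) (window : Int)
    (hnd : (counts_by_x.map Prod.fst).Nodup) :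
    has_nearby_reads x_value y_value counts_by_x window = true ↔
      ∃ p ∈ counts_by_x, |p.1 - x_value| ≤ window ∧ ∃ y ∈ p.2, |y - y_value| ≤ window := by
  unfold has_nearby_reads
  rw [List.any_eq_true]
  constructor
  · rintro ⟨xv, hxv, hb⟩
    rw [PySem.List.mem_pyRange_one] at hxv
    rcases hget : (PySem.Dict.mk counts_by_x).get? xv with _ | xc
    · rw [hget] at hb; simp at hb
    · rw [hget] at hb
      have hmem : (xv, xc) ∈ counts_by_x := by
        simpa using PySem.Dict.mem_items_of_get?_eq_some _ hget
      dsimp only at hb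
      split_ifs at hb with he
      rw [List.any_eq_true] at hb
      obtain ⟨yv, hyv, hc⟩ := hb
      rw [PySem.List.mem_pyRange_one] at hyv
      exact ⟨(xv, xc), hmem, by simp only [abs_le]; omega, yv, by simpa using hc,
        by simp only [abs_le]; omega⟩
  · rintro ⟨⟨k, ys⟩, hmem, hkx, y, hy, hyy⟩
    refine ⟨k, ?_, ?_⟩
    · rw [PySem.List.mem_pyRange_one]
      simp only [abs_le] at hkx; omega
    · have hget : (PySem.Dict.mk counts_by_x).get? k = some ys :=
        PySem.Dict.get?_of_mem_items (PySem.Dict.mk counts_by_x)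
          (by simpa using hmem) (by simpa [PySem.Dict.keys] using hnd)
      rw [hget]
      have hne : ys.isEmpty = false := by
        cases ys with
        | nil => cases hy
        | cons a t => rfl
      dsimp only
      rw [hne]
      simp only [Bool.false_eq_true, if_false, List.any_eq_true]
      refine ⟨y, ?_, by simpa using hy⟩
      rw [PySem.List.mem_pyRange_one]
      simp only [abs_le] at hyy; omega

-- Characterisation of the port of B: the same proposition.
theorem hnr_b_iff (x_value y_value : Int) (counts_by_x : List (Int × List Int)) (window : Int) :
    has_nearby_reads_alt x_value y_value counts_by_x window = true ↔
      ∃ p ∈ counts_by_x, |p.1 - x_value| ≤ window ∧ ∃ y ∈ p.2, |y - y_value| ≤ window := by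
  unfold has_nearby_reads_alt
  simp [List.any_eq_true]

-- ===== VERDICT (by name: the statement is the Claim_ definition above) =====
theorem has_nearby_reads_spec : Claim_equal_has_nearby_reads := by
  intro x_value y_value counts_by_x window _ hpre
  unfold Spec_has_nearby_reads
  have := (hnr_a_iff x_value y_value counts_by_x window hpre).trans
    (hnr_b_iff x_value y_value counts_by_x window).symm
  cases ha : has_nearby_reads x_value y_value counts_by_x window <;>
  cases hb : has_nearby_reads_alt x_value y_value counts_by_x window <;>
  simp_all
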